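-- pv_equiv track=rewrite | github.com/Zhi-Li-SRS/COMPASS | new.py | _get_continuous_regions
-- ===== SOURCE A (Python) =====
-- def _get_continuous_regions(indices):
--     """Helper function to find continuous regions in array indices"""
--     regions = []
--     start = indices[0]
--     prev = indices[0]
--
--     for idx in indices[1:]:
--         if idx - prev > 1:
--             regions.append((start, prev))
--             start = idx
--         prev = idx
--
--     regions.append((start, prev))
--     return regions
-- ===== SOURCE B (Python) =====
-- def _get_continuous_regions(indices):
--     n = len(indices)
--     breaks = [i for i in range(1, n) if indices[i] - indices[i - 1] > 1]
--     starts = [0] + breaks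
--     ends = [b - 1 for b in breaks] + [n - 1]
--     return [(indices[s], indices[e]) for s, e in zip(starts, ends)]
-- ===== Notes on version B (the rewrite author's own statement) =====
-- stated objective: alternative
-- what changed: B first collects the break positions in one scan, then constructs the run list by zipping start/end positions and mapping them back to values, instead of A's inline accumulator loop carrying start/prev state.
import Mathlib
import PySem

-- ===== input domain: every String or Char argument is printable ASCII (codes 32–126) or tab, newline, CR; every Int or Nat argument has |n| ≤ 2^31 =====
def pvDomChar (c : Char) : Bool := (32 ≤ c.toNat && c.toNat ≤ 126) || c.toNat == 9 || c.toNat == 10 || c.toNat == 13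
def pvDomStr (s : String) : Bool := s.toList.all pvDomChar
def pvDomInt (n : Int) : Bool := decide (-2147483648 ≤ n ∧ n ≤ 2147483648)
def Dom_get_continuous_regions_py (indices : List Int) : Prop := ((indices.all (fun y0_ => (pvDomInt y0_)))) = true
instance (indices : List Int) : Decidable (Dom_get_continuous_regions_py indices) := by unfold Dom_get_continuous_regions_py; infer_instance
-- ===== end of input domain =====

-- B finds break positions first, then builds runs by zipping starts/ends; same O(n) cost, different decomposition (objective: alternative).


-- ===== PORT A =====
-- A: accumulator loop over indices[1:] carrying (regions, start, prev); empty input raises (excluded by Pre_).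
def get_continuous_regions_py (indices : List Int) : List (Int × Int) :=
  match indices with
  | [] => []   -- unreachable under Pre_ (Python raises IndexError on indices[0])
  | i0 :: _ =>
    let st := (indices.drop 1).foldl
      (fun (s : List (Int × Int) × Int × Int) idx =>
        if idx - s.2.2 > 1 then (s.1 ++ [(s.2.1, s.2.2)], idx, idx)
        else (s.1, s.2.1, idx))
      ([], i0, i0)
    st.1 ++ [(st.2.1, st.2.2)]

-- ===== PORT B =====
-- B: break positions, then zip starts/ends back to values (indexing is always in range for nonempty input, so getD is exact).
def get_continuous_regions_py_alt (indices : List Int) : List (Int × Int) :=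
  let n := indices.length
  let breaks := (List.range' 1 (n - 1)).filter
    (fun i => indices.getD i 0 - indices.getD (i - 1) 0 > 1)
  let starts := 0 :: breaks
  let ends := breaks.map (fun b => b - 1) ++ [n - 1]
  (starts.zip ends).map (fun p => (indices.getD p.1 0, indices.getD p.2 0))

-- ===== PRECONDITION & SPEC =====
-- Pre_ excludes only the empty list, on which Python A (and B) raise IndexError.
def Pre_get_continuous_regions_py (indices : List Int) : Prop := indices ≠ []
instance (indices : List Int) : Decidable (Pre_get_continuous_regions_py indices) := by unfold Pre_get_continuous_regions_py; infer_instance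
def pvWitness_get_continuous_regions_py : List Int := [1, 2, 5]

def Spec_get_continuous_regions_py (indices : List Int) (out : List (Int × Int)) : Prop := out = get_continuous_regions_py_alt indices
instance (indices : List Int) (out : List (Int × Int)) : Decidable (Spec_get_continuous_regions_py indices out) := by unfold Spec_get_continuous_regions_py; infer_instance

-- ===== CLAIM (what is proved, stated in full; the proofs are below) =====
def Claim_equal_get_continuous_regions_py : Prop := ∀ (indices : List Int), Dom_get_continuous_regions_py indices → Pre_get_continuous_regions_py indices → Spec_get_continuous_regions_py indices (get_continuous_regions_py indices)

-- ===== LEMMAS AND PROOFS =====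

-- Reference recursion both ports are reduced to.
def pvRuns (start prev : Int) : List Int → List (Int × Int)
  | [] => [(start, prev)]
  | x :: xs => if x - prev > 1 then (start, prev) :: pvRuns x x xs else pvRuns start x xs

-- The start argument only affects the first component of the head pair.
theorem pvRuns_start (s s' p : Int) (xs : List Int) :
    pvRuns s p xs = (s, ((pvRuns s' p xs).headD (0, 0)).2) :: (pvRuns s' p xs).tail := by
  induction xs generalizing p with
  | nil => simp [pvRuns]
  | cons x xs ih =>
    simp only [pvRuns]
    split
    · simp
    · exact ih x

-- A's fold equals pvRuns.
theorem A_fold (acc : List (Int × Int)) (s p : Int) (xs : List Int) :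
    (let st := xs.foldl
      (fun (st : List (Int × Int) × Int × Int) idx =>
        if idx - st.2.2 > 1 then (st.1 ++ [(st.2.1, st.2.2)], idx, idx)
        else (st.1, st.2.1, idx)) (acc, s, p)
     st.1 ++ [(st.2.1, st.2.2)]) = acc ++ pvRuns s p xs := by
  induction xs generalizing acc s p with
  | nil => simp [pvRuns]
  | cons x xs ih =>
    simp only [List.foldl_cons, pvRuns]
    split
    · rw [ih]; simp
    · exact ih acc s x

theorem A_eq_runs (i0 : Int) (l : List Int) :
    get_continuous_regions_py (i0 :: l) = pvRuns i0 i0 l := by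
  simpa using A_fold [] i0 i0 l

-- Break positions of B, named for the proofs (definitionally the port's `breaks`).
def pvBreaks (l : List Int) : List Nat :=
  (List.range' 1 (l.length - 1)).filter (fun i => l.getD i 0 - l.getD (i - 1) 0 > 1)

theorem B_eq_pvB (l : List Int) :
    get_continuous_regions_py_alt l =
      ((0 :: pvBreaks l).zip ((pvBreaks l).map (fun b => b - 1) ++ [l.length - 1])).map
        (fun p => (l.getD p.1 0, l.getD p.2 0)) := rfl

theorem pvBreaks_pos (l : List Int) : ∀ b ∈ pvBreaks l, 1 ≤ b := by
  intro b hb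
  have h1 := (List.mem_filter.mp hb).1
  have h2 := (List.mem_range'_1.mp h1).1
  omega

theorem range'_shift (m : Nat) : List.range' 2 m = (List.range' 1 m).map (· + 1) := by
  simp only [List.range'_eq_map_range, List.map_map, Function.comp_def]
  exact List.map_congr_left (fun a _ => by omega)

theorem pvBreaks_cons (i0 h : Int) (t : List Int) :
    pvBreaks (i0 :: h :: t) =
      (if h - i0 > 1 then [1] else []) ++ (pvBreaks (h :: t)).map (· + 1) := by
  unfold pvBreaks
  simp only [List.length_cons, Nat.add_sub_cancel]
  rw [List.range'_succ, range'_shift, List.filter_cons, List.filter_map]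
  simp only [Function.comp_def]
  have hpred : ∀ j ∈ List.range' 1 t.length,
      (decide ((i0 :: h :: t).getD (j + 1) 0 - (i0 :: h :: t).getD (j + 1 - 1) 0 > 1))
        = (decide ((h :: t).getD j 0 - (h :: t).getD (j - 1) 0 > 1)) := by
    intro j hj
    obtain ⟨k, rfl⟩ : ∃ k, j = k + 1 := ⟨j - 1, by have := (List.mem_range'_1.mp hj).1; omega⟩
    simp
  rw [List.filter_congr hpred]
  by_cases hg : h - i0 > 1 <;> simp [hg]

theorem map_sub_add (bs : List Nat) (hb : ∀ b ∈ bs, 1 ≤ b) :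
    (bs.map (fun b => b - 1)).map (· + 1) = bs := by
  rw [List.map_map]
  conv_rhs => rw [← List.map_id bs]
  exact List.map_congr_left (fun b hbm => by have := hb b hbm; simp; omega)

theorem shiftF (i0 : Int) (L : List Int) (u v : List Nat) :
    ((u.map (· + 1)).zip (v.map (· + 1))).map
        (fun p => ((i0 :: L).getD p.1 0, (i0 :: L).getD p.2 0))
      = (u.zip v).map (fun p => (L.getD p.1 0, L.getD p.2 0)) := by
  rw [List.zip_map, List.map_map]
  exact List.map_congr_left (fun p _ => by cases p; simp [Prod.map])

-- B's cons-step characterisation: prepending i0 shifts all positions by one.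
theorem B_cons (i0 h : Int) (t : List Int) :
    get_continuous_regions_py_alt (i0 :: h :: t) =
      if h - i0 > 1 then (i0, i0) :: get_continuous_regions_py_alt (h :: t)
      else (i0, ((get_continuous_regions_py_alt (h :: t)).headD (0, 0)).2)
             :: (get_continuous_regions_py_alt (h :: t)).tail := by
  rw [B_eq_pvB, B_eq_pvB, pvBreaks_cons]
  have hpos := pvBreaks_pos (h :: t)
  by_cases hg : h - i0 > 1
  · simp only [hg, if_true, List.singleton_append]
    simp only [List.length_cons, Nat.add_sub_cancel, List.map_cons, List.zip_cons_cons,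
      Nat.sub_self, List.cons_append, List.map_cons]
    refine congrArg₂ _ rfl ?_
    rw [List.map_map]
    have hcomp : ((fun b : Nat => b - 1) ∘ fun b : Nat => b + 1) = id := by
      funext b; simp
    rw [hcomp, List.map_id]
    have hv : pvBreaks (h :: t) ++ [t.length + 1]
        = ((pvBreaks (h :: t)).map (fun b => b - 1) ++ [t.length]).map (· + 1) := by
      rw [List.map_append, map_sub_add _ hpos]; rfl
    have hu : (1 :: (pvBreaks (h :: t)).map (· + 1))
        = (0 :: pvBreaks (h :: t)).map (· + 1) := rfl
    rw [hu, hv, shiftF]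
  · simp only [hg, if_false, List.nil_append]
    simp only [List.length_cons, Nat.add_sub_cancel]
    cases hbs : pvBreaks (h :: t) with
    | nil => simp; rfl
    | cons b bs' =>
      have hb1 : 1 ≤ b := hpos b (by rw [hbs]; exact List.mem_cons_self)
      have hbs'pos : ∀ x ∈ bs', 1 ≤ x :=
        fun x hx => hpos x (by rw [hbs]; exact List.mem_cons_of_mem _ hx)
      obtain ⟨k, rfl⟩ : ∃ k, b = k + 1 := ⟨b - 1, by omega⟩
      simp only [List.map_cons, List.zip_cons_cons, List.cons_append,
        Nat.add_sub_cancel, List.headD_cons, List.tail_cons, List.map_cons]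
      refine congrArg₂ _ ?_ ?_
      · simp
      · have hv : bs' ++ [t.length + 1]
            = (bs'.map (fun x => x - 1) ++ [t.length]).map (· + 1) := by
          rw [List.map_append, map_sub_add _ hbs'pos]; rfl
        rw [List.map_map]
        have hcomp : ((fun b : Nat => b - 1) ∘ fun b : Nat => b + 1) = id := by
          funext b; simp
        have hu : ((k + 1 + 1) :: bs'.map (· + 1))
            = ((k + 1) :: bs').map (· + 1) := rfl
        rw [hcomp, List.map_id, hv, hu, shiftF]

theorem B_eq_runs (i0 : Int) (l : List Int) :
    get_continuous_regions_py_alt (i0 :: l) = pvRuns i0 i0 l := by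
  induction l generalizing i0 with
  | nil => simp [get_continuous_regions_py_alt, pvRuns]
  | cons h t ih =>
    rw [B_cons, pvRuns]
    split
    · rw [ih]
    · rw [pvRuns_start i0 h h t, ih]

-- ===== VERDICT (by name: the statement is the Claim_ definition above) =====
theorem get_continuous_regions_py_spec : Claim_equal_get_continuous_regions_py := by
  intro indices _ hpre
  unfold Spec_get_continuous_regions_py
  match indices with
  | [] => exact absurd rfl hpre
  | i0 :: l => rw [A_eq_runs, B_eq_runs]
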